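-- pv_equiv track=rewrite | github.com/lion9999ly/agent-company | scripts/doc_sync_validator.py | extract_docstring
-- ===== SOURCE A (Python) =====
-- from typing import Optional
--
-- def extract_docstring(content: str) -> Optional[str]:
--     """提取文件顶部Docstring，支持跳过开头的注释行"""
--     lines = content.split('\n')
--     # 跳过开头的注释行和空行
--     start_idx = 0
--     while start_idx < len(lines):
--         line = lines[start_idx].strip()
--         if line and not line.startswith('#'):
--             break
--         start_idx += 1
--
--     # 从第一个非注释非空行开始查找
--     remaining = '\n'.join(lines[start_idx:]).lstrip()
--
--     if remaining.startswith('"""'):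
--         end_idx = remaining.find('"""', 3)
--         if end_idx != -1:
--             return remaining[3:end_idx].strip()
--     elif remaining.startswith("'''"):
--         end_idx = remaining.find("'''", 3)
--         if end_idx != -1:
--             return remaining[3:end_idx].strip()
--
--     return None
-- ===== SOURCE B (Python) =====
-- from typing import Optional
--
-- def extract_docstring(content: str) -> Optional[str]:
--     """One character-level scan past leading blank/comment lines (no split/join), then partition on the quote."""
--     i, n = 0, len(content)
--     while i < n:
--         c = content[i]
--         if c in ' \t\r\n':
--             i += 1
--         elif c == '#':
--             while i < n and content[i] != '\n':
--                 i += 1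
--         else:
--             break
--     rem = content[i:]
--     q = rem[:3]
--     if q in ('"""', "'''"):
--         body, sep, _ = rem[3:].partition(q)
--         if sep:
--             return body.strip()
--     return None
-- ===== Notes on version B (the rewrite author's own statement) =====
-- stated objective: alternative
-- what changed: Replaces A's split-into-lines + index loop + join + lstrip pipeline with a single character-level scan that skips whitespace and whole comment lines in place, then reads the docstring directly off the remaining suffix via str.partition.
import Mathlib
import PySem

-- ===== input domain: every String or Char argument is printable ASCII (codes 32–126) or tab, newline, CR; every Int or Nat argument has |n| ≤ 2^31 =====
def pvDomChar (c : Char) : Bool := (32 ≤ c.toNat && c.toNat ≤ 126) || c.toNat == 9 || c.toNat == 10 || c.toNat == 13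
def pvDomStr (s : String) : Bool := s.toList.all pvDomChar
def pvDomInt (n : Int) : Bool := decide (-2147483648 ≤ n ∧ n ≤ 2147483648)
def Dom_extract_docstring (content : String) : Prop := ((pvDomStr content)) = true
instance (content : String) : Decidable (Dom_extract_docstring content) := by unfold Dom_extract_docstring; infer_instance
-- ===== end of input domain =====

-- B replaces A's split/join/lstrip line pipeline by one character-level scan; return values agree on the whole ASCII domain.

-- ===== PORT A =====
-- the 'while start_idx < len(lines): … start_idx += 1' loop together with 'lines[start_idx:]':
-- structural recursion returning the suffix of the line list at the break point
def skipLinesA : List (List Char) → List (List Char)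
  | [] => []
  | l :: ls =>
    let line := PySem.Chars.strip l                                   -- line = lines[start_idx].strip()
    if line ≠ [] ∧ ¬ (PySem.Chars.startswith line ['#'] = true) then l :: ls   -- 'if line and not line.startswith('#'): break'
    else skipLinesA ls

def extract_docstring (content : String) : Option String :=
  let lines := PySem.Chars.splitOn content.toList ['\n']              -- content.split('\n')
  let remaining := PySem.Chars.lstrip (PySem.Chars.join ['\n'] (skipLinesA lines))  -- '\n'.join(lines[start_idx:]).lstrip()
  if PySem.Chars.startswith remaining "\"\"\"".toList = true then
    let end_idx := PySem.Chars.findFrom remaining "\"\"\"".toList 3   -- remaining.find('"""', 3)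
    if end_idx ≠ -1 then
      some (String.ofList (PySem.Chars.strip (PySem.List.slice remaining (some 3) (some end_idx))))  -- remaining[3:end_idx].strip()
    else none
  else if PySem.Chars.startswith remaining "'''".toList = true then
    let end_idx := PySem.Chars.findFrom remaining "'''".toList 3
    if end_idx ≠ -1 then
      some (String.ofList (PySem.Chars.strip (PySem.List.slice remaining (some 3) (some end_idx))))
    else none
  else none

-- ===== PORT B =====
-- Source B's index loop 'while i < n: …' ported as recursion on the suffix content[i:]
-- (the state i appears only through content[i:]); the inner comment loop is the dropWhile to '\n'
def bskip : List Char → List Char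
  | [] => []
  | c :: cs =>
    if c = ' ' ∨ c = '\t' ∨ c = '\r' ∨ c = '\n' then bskip cs         -- c in ' \t\r\n'
    else if c = '#' then bskip (cs.dropWhile (· ≠ '\n'))              -- skip to end of comment line
    else c :: cs
termination_by cs => cs.length
decreasing_by
  · simp
  · simpa using Nat.lt_succ_of_le (List.length_dropWhile_le _ _)

def extract_docstring_alt (content : String) : Option String :=
  let rem := bskip content.toList                                     -- rem = content[i:]
  let q := rem.take 3                                                 -- q = rem[:3]  (nonnegative slice = take)
  if q = "\"\"\"".toList ∨ q = "'''".toList then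
    -- rem[3:].partition(q), ported exactly: find the FIRST occurrence of q, body = part before it,
    -- sep nonempty ⟺ the find succeeded
    let rest := rem.drop 3
    let e := PySem.Chars.find rest q
    if e ≠ -1 then some (String.ofList (PySem.Chars.strip (rest.take e.toNat))) else none
  else none

-- ===== PRECONDITION & SPEC =====
def Spec_extract_docstring (content : String) (out : Option String) : Prop := out = extract_docstring_alt content
instance (content : String) (out : Option String) : Decidable (Spec_extract_docstring content out) := by unfold Spec_extract_docstring; infer_instance

-- ===== CLAIM (what is proved, stated in full; the proofs are below) =====
def Claim_equal_extract_docstring : Prop := ∀ (content : String), Dom_extract_docstring content → Spec_extract_docstring content (extract_docstring content)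

-- ===== LEMMAS AND PROOFS =====

-- char-code helpers
lemma char_of_toNat (c d : Char) (h : c.toNat = d.toNat) : c = d :=
  Char.ext (UInt32.toNat_inj.mp h)

-- on the ASCII domain, Python str-whitespace is exactly the four characters B tests
lemma dom_isspace_iff (c : Char) (h : pvDomChar c = true) :
    PySem.Chars.isspace c = true ↔ (c = ' ' ∨ c = '\t' ∨ c = '\r' ∨ c = '\n') := by
  constructor
  · intro hs
    simp only [pvDomChar, Bool.or_eq_true, Bool.and_eq_true, decide_eq_true_eq, beq_iff_eq] at h
    simp only [PySem.Chars.isspace, Bool.or_eq_true, Bool.and_eq_true, decide_eq_true_eq] at hs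
    have hn : c.toNat = 32 ∨ c.toNat = 9 ∨ c.toNat = 10 ∨ c.toNat = 13 := by omega
    rcases hn with hn | hn | hn | hn
    · exact Or.inl (char_of_toNat c ' ' hn)
    · exact Or.inr (Or.inl (char_of_toNat c '\t' hn))
    · exact Or.inr (Or.inr (Or.inr (char_of_toNat c '\n' hn)))
    · exact Or.inr (Or.inr (Or.inl (char_of_toNat c '\r' hn)))
  · rintro (rfl | rfl | rfl | rfl) <;> decide

lemma ws_isspace (c : Char) (h : c = ' ' ∨ c = '\t' ∨ c = '\r' ∨ c = '\n') :
    PySem.Chars.isspace c = true := by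
  rcases h with rfl | rfl | rfl | rfl <;> decide

-- bskip ignores a leading block of the four whitespace characters
lemma bskip_ws_append (w x : List Char)
    (h : ∀ c ∈ w, c = ' ' ∨ c = '\t' ∨ c = '\r' ∨ c = '\n') :
    bskip (w ++ x) = bskip x := by
  induction w with
  | nil => rfl
  | cons c w ih =>
    rw [List.cons_append, bskip, if_pos (h c (by simp))]
    exact ih (fun d hd => h d (by simp [hd]))

lemma bskip_stop (c : Char) (cs : List Char)
    (hws : ¬(c = ' ' ∨ c = '\t' ∨ c = '\r' ∨ c = '\n')) (hh : ¬ c = '#') :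
    bskip (c :: cs) = c :: cs := by
  rw [bskip, if_neg hws, if_neg hh]

-- reference form of content.split('\n') (single-character separator)
def pvSplit (pre : List Char) : List Char → List (List Char)
  | [] => [pre]
  | c :: r => if c = '\n' then pre :: pvSplit [] r else pvSplit (pre ++ [c]) r

lemma pvSplit_ne_nil (cs pre : List Char) : pvSplit pre cs ≠ [] := by
  induction cs generalizing pre with
  | nil => simp [pvSplit]
  | cons c r ih =>
    by_cases h : c = '\n'
    · simp [pvSplit, h]
    · simpa [pvSplit, h] using ih (pre ++ [c])

lemma go_eq (fuel : Nat) : ∀ (l cur : List Char) (acc : List (List Char)), l.length < fuel →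
    PySem.Chars.splitOn.go ['\n'] fuel l cur acc = acc.reverse ++ pvSplit cur.reverse l := by
  induction fuel with
  | zero => intro l cur acc h; omega
  | succ fuel ih =>
    intro l cur acc h
    cases l with
    | nil => rw [PySem.Chars.splitOn.go.eq_def]; simp [pvSplit]
    | cons c rest =>
      rw [PySem.Chars.splitOn.go.eq_def]
      by_cases hc : c = '\n'
      · subst hc
        have hpre : (['\n'].isPrefixOf ('\n' :: rest)) = true := by
          simp [List.isPrefixOf]
        simp only [hpre, if_true, reduceIte, List.length_cons, List.length_nil,
          List.drop_succ_cons, List.drop_zero]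
        rw [ih rest [] (cur.reverse :: acc) (by simpa using Nat.lt_of_succ_lt_succ h)]
        simp [pvSplit]
      · have hpre : (['\n'].isPrefixOf (c :: rest)) = false := by
          simp [List.isPrefixOf]
          exact fun hx => (hc hx.symm).elim
        simp only [hpre, Bool.false_eq_true, if_false, reduceIte]
        rw [ih rest (c :: cur) acc (by simpa using Nat.lt_of_succ_lt_succ h)]
        simp [pvSplit, hc]

lemma splitOn_nl (cs : List Char) : PySem.Chars.splitOn cs ['\n'] = pvSplit [] cs := by
  rw [PySem.Chars.splitOn, go_eq (cs.length + 1) cs [] [] (Nat.lt_succ_self _)]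
  simp

lemma join_pvSplit : ∀ (cs pre : List Char), PySem.Chars.join ['\n'] (pvSplit pre cs) = pre ++ cs := by
  intro cs
  induction cs with
  | nil => intro pre; simp [pvSplit, PySem.Chars.join_singleton]
  | cons c r ih =>
    intro pre
    by_cases hc : c = '\n'
    · subst hc
      simp only [pvSplit, if_true, reduceIte]
      obtain ⟨h, t, he⟩ := List.exists_cons_of_ne_nil (pvSplit_ne_nil r [])
      rw [he, PySem.Chars.join_cons_cons, ← he, ih []]
      simp
    · simp only [pvSplit, hc, if_false, reduceIte]
      rw [ih (pre ++ [c])]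
      simp

lemma pvSplit_clean : ∀ (cs pre : List Char), (∀ c ∈ cs, pvDomChar c = true) →
    ('\n' ∉ pre) → (∀ c ∈ pre, pvDomChar c = true) →
    ∀ l ∈ pvSplit pre cs, ('\n' ∉ l) ∧ ∀ c ∈ l, pvDomChar c = true := by
  intro cs
  induction cs with
  | nil =>
    intro pre _ h1 h2 l hl
    simp only [pvSplit, List.mem_singleton] at hl
    subst hl; exact ⟨h1, h2⟩
  | cons c r ih =>
    intro pre hdom h1 h2 l hl
    by_cases hc : c = '\n'
    · subst hc
      simp only [pvSplit, if_true, reduceIte, List.mem_cons] at hl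
      rcases hl with rfl | hl
      · exact ⟨h1, h2⟩
      · exact ih [] (fun d hd => hdom d (by simp [hd])) (by simp) (by simp) l hl
    · simp only [pvSplit, hc, if_false, reduceIte] at hl
      refine ih (pre ++ [c]) (fun d hd => hdom d (by simp [hd])) ?_ ?_ l hl
      · simp [h1, Ne.symm hc]
      · intro d hd
        rcases List.mem_append.mp hd with hd | hd
        · exact h2 d hd
        · simp only [List.mem_singleton] at hd; subst hd; exact hdom d (by simp)

-- strip l is a prefix of lstrip l
lemma strip_prefix_lstrip (l : List Char) : PySem.Chars.strip l <+: PySem.Chars.lstrip l := by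
  rw [PySem.Chars.strip, PySem.Chars.rstrip]
  rw [← List.reverse_reverse (PySem.Chars.lstrip l)]
  exact (List.reverse_prefix).mpr
    (by simpa using List.dropWhile_suffix (l := (PySem.Chars.lstrip l).reverse) PySem.Chars.isspace)

lemma strip_nil_all_space (l : List Char) (h : PySem.Chars.strip l = []) :
    ∀ c ∈ l, PySem.Chars.isspace c = true := by
  rw [PySem.Chars.strip, PySem.Chars.rstrip, List.reverse_eq_nil_iff, List.dropWhile_eq_nil_iff] at h
  intro c hc
  rw [← List.takeWhile_append_dropWhile (p := PySem.Chars.isspace) (l := l)] at hc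
  rcases List.mem_append.mp hc with hc | hc
  · exact List.mem_takeWhile_imp hc
  · exact h c (by simpa [PySem.Chars.lstrip] using hc)

lemma lstrip_head (l : List Char) (h : PySem.Chars.strip l ≠ []) :
    ∃ d t, PySem.Chars.lstrip l = d :: t ∧ PySem.Chars.isspace d = false ∧
      ∃ u, PySem.Chars.strip l = d :: u := by
  obtain ⟨d, u, hdu⟩ := List.exists_cons_of_ne_nil h
  have hpre := strip_prefix_lstrip l
  rw [hdu] at hpre
  obtain ⟨t', ht⟩ := hpre
  refine ⟨d, u ++ t', by simpa using ht.symm, ?_, u, hdu⟩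
  have hls : PySem.Chars.lstrip l = List.dropWhile PySem.Chars.isspace l := rfl
  have hdw : List.dropWhile PySem.Chars.isspace l = d :: (u ++ t') := by
    rw [← hls]; simpa using ht.symm
  have hhead := List.head_dropWhile_not (l := l) PySem.Chars.isspace (by simp [hdw])
  simpa [hdw] using hhead

-- the heart: B's character scan equals A's line loop + join + lstrip
lemma skip_join : ∀ (ls : List (List Char)),
    (∀ l ∈ ls, ('\n' ∉ l) ∧ ∀ c ∈ l, pvDomChar c = true) →
    bskip (PySem.Chars.join ['\n'] ls) =
      PySem.Chars.lstrip (PySem.Chars.join ['\n'] (skipLinesA ls)) := by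
  intro ls
  induction ls with
  | nil => intro _; simp [PySem.Chars.join_nil, skipLinesA, bskip, PySem.Chars.lstrip]
  | cons l ls ih =>
    intro h
    obtain ⟨hnl, hdoml⟩ := h l (by simp)
    have hrest : ∀ l' ∈ ls, ('\n' ∉ l') ∧ ∀ c ∈ l', pvDomChar c = true :=
      fun l' hl' => h l' (by simp [hl'])
    have htail : ∃ tail, PySem.Chars.join ['\n'] (l :: ls) = l ++ tail ∧
        bskip tail = bskip (PySem.Chars.join ['\n'] ls) ∧
        List.dropWhile (fun c => c ≠ '\n') tail = tail := by
      cases ls with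
      | nil =>
        exact ⟨[], by simp [PySem.Chars.join_singleton], by simp, by simp⟩
      | cons l2 ls2 =>
        refine ⟨'\n' :: PySem.Chars.join ['\n'] (l2 :: ls2), ?_, ?_, ?_⟩
        · rw [PySem.Chars.join_cons_cons]; simp
        · rw [bskip, if_pos (by simp)]
        · simp
    obtain ⟨tail, hj, hbt, hdw⟩ := htail
    have hws : ∀ c ∈ l, PySem.Chars.isspace c = true →
        (c = ' ' ∨ c = '\t' ∨ c = '\r' ∨ c = '\n') :=
      fun c hc hs => (dom_isspace_iff c (hdoml c hc)).mp hs
    rw [hj]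
    by_cases hC : PySem.Chars.strip l ≠ [] ∧ ¬ (PySem.Chars.startswith (PySem.Chars.strip l) ['#'] = true)
    · -- A breaks at this line
      rw [skipLinesA]
      rw [if_pos hC, hj]
      obtain ⟨d, t, hlst, hdsp, u, hstr⟩ := lstrip_head l hC.1
      have hdhash : ¬ d = '#' := by
        intro hd
        apply hC.2
        rw [hstr, hd, PySem.Chars.startswith]
        rw [List.isPrefixOf_iff_prefix, List.cons_prefix_cons]
        exact ⟨rfl, List.nil_prefix⟩
      have hdec : l = List.takeWhile PySem.Chars.isspace l ++ (d :: t) := by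
        rw [← hlst]; exact (List.takeWhile_append_dropWhile).symm
      have hwsl : ∀ c ∈ List.takeWhile PySem.Chars.isspace l,
          (c = ' ' ∨ c = '\t' ∨ c = '\r' ∨ c = '\n') :=
        fun c hc => hws c ((List.takeWhile_sublist _).subset hc) (List.mem_takeWhile_imp hc)
      have hdns : ¬(d = ' ' ∨ d = '\t' ∨ d = '\r' ∨ d = '\n') := by
        intro hd; rw [ws_isspace d hd] at hdsp; exact Bool.false_ne_true hdsp.symm
      have hsplit2 : l ++ tail = List.takeWhile PySem.Chars.isspace l ++ (d :: (t ++ tail)) := by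
        conv_lhs => rw [hdec]
        simp
      calc bskip (l ++ tail)
          = bskip (List.takeWhile PySem.Chars.isspace l ++ (d :: (t ++ tail))) := by
            rw [hsplit2]
        _ = d :: (t ++ tail) := by rw [bskip_ws_append _ _ hwsl, bskip_stop d _ hdns hdhash]
        _ = PySem.Chars.lstrip (l ++ tail) := by
            simp only [PySem.Chars.lstrip]
            conv_rhs => rw [hdec]
            rw [List.append_assoc, List.dropWhile_append]
            have h1 : List.dropWhile PySem.Chars.isspace (List.takeWhile PySem.Chars.isspace l) = [] :=
              List.dropWhile_eq_nil_iff.mpr (fun a ha => List.mem_takeWhile_imp ha)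
            rw [h1]
            simp [hdsp]
    · -- A skips this line
      rw [skipLinesA]
      rw [if_neg hC]
      by_cases hstrip : PySem.Chars.strip l = []
      · have hall : ∀ c ∈ l, (c = ' ' ∨ c = '\t' ∨ c = '\r' ∨ c = '\n') :=
          fun c hc => hws c hc (strip_nil_all_space l hstrip c hc)
        rw [bskip_ws_append l tail hall, hbt]
        exact ih hrest
      · have hhash : PySem.Chars.startswith (PySem.Chars.strip l) ['#'] = true := by
          by_contra hx
          exact hC ⟨hstrip, hx⟩
        obtain ⟨d, t, hlst, hdsp, u, hstr⟩ := lstrip_head l hstrip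
        have hd : d = '#' := by
          rw [hstr, PySem.Chars.startswith, List.isPrefixOf_iff_prefix, List.cons_prefix_cons] at hhash
          exact hhash.1.symm
        subst hd
        have hdec : l = List.takeWhile PySem.Chars.isspace l ++ ('#' :: t) := by
          rw [← hlst]; exact (List.takeWhile_append_dropWhile).symm
        have hwsl : ∀ c ∈ List.takeWhile PySem.Chars.isspace l,
            (c = ' ' ∨ c = '\t' ∨ c = '\r' ∨ c = '\n') :=
          fun c hc => hws c ((List.takeWhile_sublist _).subset hc) (List.mem_takeWhile_imp hc)
        have htnl : List.dropWhile (fun c => c ≠ '\n') (t ++ tail) = tail := by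
          rw [List.dropWhile_append]
          have h1 : List.dropWhile (fun c : Char => c ≠ '\n') t = [] := by
            rw [List.dropWhile_eq_nil_iff]
            intro a ha
            have hal : a ∈ l := by rw [hdec]; simp [ha]
            simp only [ne_eq, decide_not, Bool.not_eq_eq_eq_not, Bool.not_true,
              decide_eq_false_iff_not]
            by_contra haeq
            exact hnl (by rw [show a = '\n' by simpa using haeq] at hal; exact hal)
          rw [h1, hdw]
          simp
        have hsplit2 : l ++ tail = List.takeWhile PySem.Chars.isspace l ++ ('#' :: (t ++ tail)) := by
          conv_lhs => rw [hdec]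
          simp
        calc bskip (l ++ tail)
            = bskip ('#' :: (t ++ tail)) := by
              rw [hsplit2, bskip_ws_append _ _ hwsl]
          _ = bskip tail := by
              rw [bskip, if_neg (by decide), if_pos rfl, htnl]
          _ = PySem.Chars.lstrip (PySem.Chars.join ['\n'] (skipLinesA ls)) := by
              rw [hbt]; exact ih hrest

-- both docstring tails agree once the remaining suffix is the same
lemma branch_eq (rem q : List Char) (h3 : q.length = 3) (hpre : q <+: rem) :
    (if PySem.Chars.findFrom rem q 3 ≠ -1 then
        some (String.ofList (PySem.Chars.strip
          (PySem.List.slice rem (some 3) (some (PySem.Chars.findFrom rem q 3)))))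
      else none)
    = (if PySem.Chars.find (rem.drop 3) q ≠ -1 then
        some (String.ofList (PySem.Chars.strip
          ((rem.drop 3).take (PySem.Chars.find (rem.drop 3) q).toNat)))
      else none) := by
  have hlen : 3 ≤ rem.length := by
    have := hpre.length_le; omega
  have hcast : (3 : Int) = ((3 : Nat) : Int) := by norm_num
  rw [hcast, PySem.Chars.findFrom_natCast rem q 3 hlen]
  by_cases hf : PySem.Chars.find (rem.drop 3) q = -1
  · simp [hf]
  · have hge : 0 ≤ PySem.Chars.find (rem.drop 3) q := by
      have := PySem.Chars.neg_one_le_find (rem.drop 3) q; omega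
    rw [if_neg hf]
    have hA : ((3 : Nat) : Int) + PySem.Chars.find (rem.drop 3) q ≠ -1 := by
      push_cast; omega
    have hB : PySem.Chars.find (rem.drop 3) q ≠ -1 := hf
    rw [if_pos hA, if_pos hB]
    congr 2
    have he : ((3 : Nat) : Int) + PySem.Chars.find (rem.drop 3) q
        = ((3 + (PySem.Chars.find (rem.drop 3) q).toNat : Nat) : Int) := by
      push_cast; omega
    rw [he, PySem.List.slice_natCast rem 3 (3 + (PySem.Chars.find (rem.drop 3) q).toNat),
      Nat.add_sub_cancel_left]

lemma take_prefix_of_len (rem q : List Char) (h3 : q.length = 3) :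
    rem.take 3 = q ↔ q <+: rem := by
  rw [List.prefix_iff_eq_take, h3, eq_comm]


-- ===== VERDICT (by name: the statement is the Claim_ definition above) =====
theorem extract_docstring_spec : Claim_equal_extract_docstring := by
  intro content hdom
  unfold Spec_extract_docstring extract_docstring extract_docstring_alt
  dsimp only
  have hdom' : ∀ c ∈ content.toList, pvDomChar c = true := by
    simpa [Dom_extract_docstring, pvDomStr, List.all_eq_true] using hdom
  have hclean := pvSplit_clean content.toList [] hdom' (by simp) (by simp)
  have hrem : PySem.Chars.lstrip (PySem.Chars.join ['\n']
      (skipLinesA (PySem.Chars.splitOn content.toList ['\n']))) = bskip content.toList := by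
    rw [splitOn_nl, ← skip_join _ hclean, join_pvSplit]
    simp
  rw [hrem]
  set rem := bskip content.toList with hremdef
  by_cases h1 : "\"\"\"".toList <+: rem
  · rw [if_pos ((PySem.Chars.startswith_iff rem _).mpr h1)]
    have ht : rem.take 3 = "\"\"\"".toList := (take_prefix_of_len rem _ (by decide)).mpr h1
    rw [if_pos (Or.inl ht), ht]
    exact branch_eq rem _ (by decide) h1
  · by_cases h2 : "'''".toList <+: rem
    · rw [if_neg (by rw [PySem.Chars.startswith_iff]; exact h1)]
      rw [if_pos ((PySem.Chars.startswith_iff rem _).mpr h2)]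
      have ht : rem.take 3 = "'''".toList := (take_prefix_of_len rem _ (by decide)).mpr h2
      rw [if_pos (Or.inr ht), ht]
      exact branch_eq rem _ (by decide) h2
    · rw [if_neg (by rw [PySem.Chars.startswith_iff]; exact h1),
        if_neg (by rw [PySem.Chars.startswith_iff]; exact h2)]
      rw [if_neg ?_]
      rintro (ht | ht)
      · exact h1 ((take_prefix_of_len rem _ (by decide)).mp ht)
      · exact h2 ((take_prefix_of_len rem _ (by decide)).mp ht)
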